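-- pv_equiv track=rewrite | github.com/DrakoLabs/drako | tools/threat-intel-sync/sync_otx.py | _classify_ioc_type
-- ===== SOURCE A (Python) =====
-- from typing import Any
--
-- def _classify_ioc_type(pulse: dict[str, Any]) -> str:
--     """Classify the IOC type based on pulse tags."""
--     tags = {t.lower() for t in pulse.get("tags", [])}
--     if tags & {"prompt injection", "injection"}:
--         return "PROMPT_INJECTION"
--     if tags & {"supply chain", "poisoning", "backdoor"}:
--         return "SUPPLY_CHAIN"
--     if tags & {"exfiltration", "data leak", "credential"}:
--         return "DATA_EXFILTRATION"
--     return "GENERIC_THREAT"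
-- ===== SOURCE B (Python) =====
-- _TAG_TABLE = {
--     "prompt injection": (0, "PROMPT_INJECTION"),
--     "injection": (0, "PROMPT_INJECTION"),
--     "supply chain": (1, "SUPPLY_CHAIN"),
--     "poisoning": (1, "SUPPLY_CHAIN"),
--     "backdoor": (1, "SUPPLY_CHAIN"),
--     "exfiltration": (2, "DATA_EXFILTRATION"),
--     "data leak": (2, "DATA_EXFILTRATION"),
--     "credential": (2, "DATA_EXFILTRATION"),
-- }
--
--
-- def _classify_ioc_type(pulse):
--     """Classify the IOC type by one min-priority scan over the pulse tags."""
--     best = (3, "GENERIC_THREAT")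
--     for t in pulse.get("tags", []):
--         entry = _TAG_TABLE.get(t.lower())
--         if entry is not None and entry[0] < best[0]:
--             best = entry
--     return best[1]
-- ===== Notes on version B (the rewrite author's own statement) =====
-- stated objective: alternative
-- what changed: Replaced A's three lowercased-set intersections against three literal category sets by a single flat tag->(priority_rank, category) table and one min-priority scan over the tags with an accumulator.
import Mathlib
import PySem

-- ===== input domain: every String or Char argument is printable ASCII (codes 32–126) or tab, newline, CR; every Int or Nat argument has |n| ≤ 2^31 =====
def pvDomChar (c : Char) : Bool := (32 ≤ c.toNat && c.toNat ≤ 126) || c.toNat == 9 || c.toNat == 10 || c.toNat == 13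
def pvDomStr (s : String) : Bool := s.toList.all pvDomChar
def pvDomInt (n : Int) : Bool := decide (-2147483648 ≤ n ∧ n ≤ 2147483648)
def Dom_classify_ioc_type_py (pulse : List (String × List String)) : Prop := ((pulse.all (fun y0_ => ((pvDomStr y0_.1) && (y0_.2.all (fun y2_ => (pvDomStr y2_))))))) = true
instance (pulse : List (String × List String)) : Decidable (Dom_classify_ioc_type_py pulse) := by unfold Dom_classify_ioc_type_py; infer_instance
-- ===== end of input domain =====

-- B replaces A's three set-intersection branches by one min-priority scan over the tags
-- against a flat tag→(rank, category) table (objective: alternative, same cost).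

-- ===== PORT A =====
def classify_ioc_type_py (pulse : List (String × List String)) : String :=
  let tagsList := ((pulse.find? (fun p => p.1 == "tags")).map Prod.snd).getD []
  let tags : PySem.Set String := PySem.Set.ofList (tagsList.map PySem.Str.lower)
  if PySem.Set.inter tags (PySem.Set.ofList ["prompt injection", "injection"]) ≠ [] then
    "PROMPT_INJECTION"
  else if PySem.Set.inter tags (PySem.Set.ofList ["supply chain", "poisoning", "backdoor"]) ≠ [] then
    "SUPPLY_CHAIN"
  else if PySem.Set.inter tags (PySem.Set.ofList ["exfiltration", "data leak", "credential"]) ≠ [] then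
    "DATA_EXFILTRATION"
  else
    "GENERIC_THREAT"

-- ===== PORT B =====
def pvTagTable : PySem.Dict String (Nat × String) :=
  PySem.Dict.ofList
    [ ("prompt injection", (0, "PROMPT_INJECTION"))
    , ("injection",        (0, "PROMPT_INJECTION"))
    , ("supply chain",     (1, "SUPPLY_CHAIN"))
    , ("poisoning",        (1, "SUPPLY_CHAIN"))
    , ("backdoor",         (1, "SUPPLY_CHAIN"))
    , ("exfiltration",     (2, "DATA_EXFILTRATION"))
    , ("data leak",        (2, "DATA_EXFILTRATION"))
    , ("credential",       (2, "DATA_EXFILTRATION")) ]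

def classify_ioc_type_py_alt (pulse : List (String × List String)) : String :=
  let tagsList := ((pulse.find? (fun p => p.1 == "tags")).map Prod.snd).getD []
  (tagsList.foldl
    (fun (best : Nat × String) t =>
      match PySem.Dict.get? pvTagTable (PySem.Str.lower t) with
      | some entry => if entry.1 < best.1 then entry else best
      | none => best)
    (3, "GENERIC_THREAT")).2

-- ===== PRECONDITION & SPEC =====
def Spec_classify_ioc_type_py (pulse : List (String × List String)) (out : String) : Prop := out = classify_ioc_type_py_alt pulse
instance (pulse : List (String × List String)) (out : String) : Decidable (Spec_classify_ioc_type_py pulse out) := by unfold Spec_classify_ioc_type_py; infer_instance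

-- ===== CLAIM (what is proved, stated in full; the proofs are below) =====
def Claim_equal_classify_ioc_type_py : Prop := ∀ (pulse : List (String × List String)), Dom_classify_ioc_type_py pulse → Spec_classify_ioc_type_py pulse (classify_ioc_type_py pulse)

-- ===== LEMMAS AND PROOFS =====

-- the category named by a priority rank
def pvCat : Nat → String
  | 0 => "PROMPT_INJECTION"
  | 1 => "SUPPLY_CHAIN"
  | 2 => "DATA_EXFILTRATION"
  | _ => "GENERIC_THREAT"

-- the priority rank the table assigns to a (lowercased) tag; 3 = unknown
def pvR (x : String) : Nat := ((PySem.Dict.get? pvTagTable x).map Prod.fst).getD 3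

-- minimal rank over a list of raw tags
def pvMinR (ts : List String) : Nat :=
  ts.foldr (fun t a => min (pvR (PySem.Str.lower t)) a) 3

lemma pvTable_get (x : String) :
    PySem.Dict.get? pvTagTable x =
      if x = "prompt injection" then some (0, "PROMPT_INJECTION")
      else if x = "injection" then some (0, "PROMPT_INJECTION")
      else if x = "supply chain" then some (1, "SUPPLY_CHAIN")
      else if x = "poisoning" then some (1, "SUPPLY_CHAIN")
      else if x = "backdoor" then some (1, "SUPPLY_CHAIN")
      else if x = "exfiltration" then some (2, "DATA_EXFILTRATION")
      else if x = "data leak" then some (2, "DATA_EXFILTRATION")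
      else if x = "credential" then some (2, "DATA_EXFILTRATION")
      else none := by
  have h : pvTagTable.items =
      [ ("prompt injection", (0, "PROMPT_INJECTION"))
      , ("injection",        (0, "PROMPT_INJECTION"))
      , ("supply chain",     (1, "SUPPLY_CHAIN"))
      , ("poisoning",        (1, "SUPPLY_CHAIN"))
      , ("backdoor",         (1, "SUPPLY_CHAIN"))
      , ("exfiltration",     (2, "DATA_EXFILTRATION"))
      , ("data leak",        (2, "DATA_EXFILTRATION"))
      , ("credential",       (2, "DATA_EXFILTRATION")) ] := by rfl
  simp only [PySem.Dict.get?, h, List.find?]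
  rcases eq_or_ne x "prompt injection" with h1 | h1
  · simp [h1]
  have e1 : ("prompt injection" == x) = false := beq_eq_false_iff_ne.mpr (Ne.symm h1)
  rcases eq_or_ne x "injection" with h2 | h2
  · simp [h2]
  have e2 : ("injection" == x) = false := beq_eq_false_iff_ne.mpr (Ne.symm h2)
  rcases eq_or_ne x "supply chain" with h3 | h3
  · simp [h3]
  have e3 : ("supply chain" == x) = false := beq_eq_false_iff_ne.mpr (Ne.symm h3)
  rcases eq_or_ne x "poisoning" with h4 | h4
  · simp [h4]
  have e4 : ("poisoning" == x) = false := beq_eq_false_iff_ne.mpr (Ne.symm h4)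
  rcases eq_or_ne x "backdoor" with h5 | h5
  · simp [h5]
  have e5 : ("backdoor" == x) = false := beq_eq_false_iff_ne.mpr (Ne.symm h5)
  rcases eq_or_ne x "exfiltration" with h6 | h6
  · simp [h6]
  have e6 : ("exfiltration" == x) = false := beq_eq_false_iff_ne.mpr (Ne.symm h6)
  rcases eq_or_ne x "data leak" with h7 | h7
  · simp [h7]
  have e7 : ("data leak" == x) = false := beq_eq_false_iff_ne.mpr (Ne.symm h7)
  rcases eq_or_ne x "credential" with h8 | h8
  · simp [h8]
  have e8 : ("credential" == x) = false := beq_eq_false_iff_ne.mpr (Ne.symm h8)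
  simp [e1, e2, e3, e4, e5, e6, e7, e8, h1, h2, h3, h4, h5, h6, h7, h8]

lemma pvR_zero_iff (x : String) :
    pvR x = 0 ↔ x ∈ (["prompt injection", "injection"] : List String) := by
  rw [pvR, pvTable_get]; split_ifs <;> simp_all

lemma pvR_one_iff (x : String) :
    pvR x = 1 ↔ x ∈ (["supply chain", "poisoning", "backdoor"] : List String) := by
  rw [pvR, pvTable_get]; split_ifs <;> simp_all

lemma pvR_two_iff (x : String) :
    pvR x = 2 ↔ x ∈ (["exfiltration", "data leak", "credential"] : List String) := by
  rw [pvR, pvTable_get]; split_ifs <;> simp_all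

lemma pvMinstep (n k : Nat) (s : String) (hs : pvCat k = s) :
    ((if k < n then ((k : Nat), s) else (n, pvCat n)) : Nat × String)
      = (min n k, pvCat (min n k)) := by
  rcases Nat.lt_or_ge k n with h | h
  · rw [if_pos h, Nat.min_eq_right h.le, hs]
  · rw [if_neg (Nat.not_lt.mpr h), Nat.min_eq_left h]

lemma pvStep_eq (n : Nat) (hn : n ≤ 3) (t : String) :
    (match PySem.Dict.get? pvTagTable (PySem.Str.lower t) with
      | some entry => if entry.1 < ((n, pvCat n) : Nat × String).1 then entry else (n, pvCat n)
      | none => (n, pvCat n))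
      = (min n (pvR (PySem.Str.lower t)), pvCat (min n (pvR (PySem.Str.lower t)))) := by
  generalize PySem.Str.lower t = x
  rw [pvTable_get, pvR, pvTable_get]
  split_ifs <;> simp only [Option.map_some, Option.map_none, Option.getD_some, Option.getD_none]
  · exact pvMinstep n 0 _ rfl
  · exact pvMinstep n 0 _ rfl
  · exact pvMinstep n 1 _ rfl
  · exact pvMinstep n 1 _ rfl
  · exact pvMinstep n 1 _ rfl
  · exact pvMinstep n 2 _ rfl
  · exact pvMinstep n 2 _ rfl
  · exact pvMinstep n 2 _ rfl
  · rw [Nat.min_eq_left hn]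

lemma pvFoldB (ts : List String) : ∀ n : Nat, n ≤ 3 →
    ts.foldl
      (fun (best : Nat × String) t =>
        match PySem.Dict.get? pvTagTable (PySem.Str.lower t) with
        | some entry => if entry.1 < best.1 then entry else best
        | none => best)
      (n, pvCat n)
      = (min n (pvMinR ts), pvCat (min n (pvMinR ts))) := by
  induction ts with
  | nil =>
      intro n hn
      simp [pvMinR, Nat.min_eq_left hn]
  | cons t ts ih =>
      intro n hn
      rw [List.foldl_cons, pvStep_eq n hn t,
        ih (min n (pvR (PySem.Str.lower t))) (le_trans (Nat.min_le_left _ _) hn)]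
      have hm : min (min n (pvR (PySem.Str.lower t))) (pvMinR ts)
          = min n (pvMinR (t :: ts)) := by
        show _ = min n (min (pvR (PySem.Str.lower t)) (pvMinR ts))
        omega
      rw [hm]

lemma pvInterA (L g : List String) :
    (PySem.Set.inter (PySem.Set.ofList L) (PySem.Set.ofList g) ≠ []) ↔ ∃ x ∈ L, x ∈ g := by
  rw [Ne, List.eq_nil_iff_forall_not_mem]
  push Not
  constructor
  · rintro ⟨x, hx⟩
    rw [PySem.Set.mem_inter, PySem.Set.mem_ofList, PySem.Set.mem_ofList] at hx
    exact ⟨x, hx.1, hx.2⟩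
  · rintro ⟨x, h1, h2⟩
    exact ⟨x, by rw [PySem.Set.mem_inter, PySem.Set.mem_ofList, PySem.Set.mem_ofList]; exact ⟨h1, h2⟩⟩

lemma pvMinR_le_of_mem {ts : List String} {t : String} (h : t ∈ ts) :
    pvMinR ts ≤ pvR (PySem.Str.lower t) := by
  induction ts with
  | nil => cases h
  | cons a ts ih =>
      rcases List.mem_cons.mp h with rfl | h'
      · show min _ _ ≤ _; omega
      · have := ih h'
        show min _ (pvMinR ts) ≤ _; omega

lemma pvLe_pvMinR {ts : List String} {k : Nat} (hk : k ≤ 3)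
    (h : ∀ t ∈ ts, k ≤ pvR (PySem.Str.lower t)) : k ≤ pvMinR ts := by
  induction ts with
  | nil => exact hk
  | cons a ts ih =>
      have h1 := h a (List.mem_cons_self ..)
      have h2 := ih (fun t ht => h t (List.mem_cons_of_mem _ ht))
      show k ≤ min _ (pvMinR ts); omega

lemma pvMinR_le_three (ts : List String) : pvMinR ts ≤ 3 := by
  induction ts with
  | nil => simp [pvMinR]
  | cons a ts ih => show min _ (pvMinR ts) ≤ 3; omega

-- ===== VERDICT (by name: the statement is the Claim_ definition above) =====
theorem classify_ioc_type_py_spec : Claim_equal_classify_ioc_type_py := by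
  intro pulse _
  unfold Spec_classify_ioc_type_py classify_ioc_type_py classify_ioc_type_py_alt
  set ts := ((pulse.find? (fun p => p.1 == "tags")).map Prod.snd).getD [] with hts
  simp only
  rw [show ((3 : Nat), "GENERIC_THREAT") = ((3 : Nat), pvCat 3) from rfl,
    pvFoldB ts 3 le_rfl, Nat.min_eq_right (pvMinR_le_three ts)]
  have hmem : ∀ (g : List String),
      ((∃ x ∈ ts.map PySem.Str.lower, x ∈ g) ↔ ∃ t ∈ ts, PySem.Str.lower t ∈ g) := by
    intro g
    constructor
    · rintro ⟨x, hx, hg⟩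
      obtain ⟨t, ht, rfl⟩ := List.mem_map.mp hx
      exact ⟨t, ht, hg⟩
    · rintro ⟨t, ht, hg⟩
      exact ⟨_, List.mem_map.mpr ⟨t, ht, rfl⟩, hg⟩
  by_cases c0 : ∃ t ∈ ts, pvR (PySem.Str.lower t) = 0
  · obtain ⟨t, ht, h0⟩ := c0
    have hM : pvMinR ts = 0 := by
      have := pvMinR_le_of_mem ht; omega
    rw [if_pos ((pvInterA _ _).mpr ((hmem _).mpr ⟨t, ht, (pvR_zero_iff _).mp h0⟩)), hM]
    rfl
  · have n0 : ∀ t ∈ ts, 1 ≤ pvR (PySem.Str.lower t) := by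
      intro t ht
      have : pvR (PySem.Str.lower t) ≠ 0 := fun h => c0 ⟨t, ht, h⟩
      omega
    rw [if_neg (by
      rw [pvInterA, hmem]
      rintro ⟨t, ht, hg⟩
      exact c0 ⟨t, ht, (pvR_zero_iff _).mpr hg⟩)]
    by_cases c1 : ∃ t ∈ ts, pvR (PySem.Str.lower t) = 1
    · obtain ⟨t, ht, h1⟩ := c1
      have hM : pvMinR ts = 1 := by
        have := pvMinR_le_of_mem ht
        have := pvLe_pvMinR (by omega) n0
        omega
      rw [if_pos ((pvInterA _ _).mpr ((hmem _).mpr ⟨t, ht, (pvR_one_iff _).mp h1⟩)), hM]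
      rfl
    · have n1 : ∀ t ∈ ts, 2 ≤ pvR (PySem.Str.lower t) := by
        intro t ht
        have h := n0 t ht
        have : pvR (PySem.Str.lower t) ≠ 1 := fun h => c1 ⟨t, ht, h⟩
        omega
      rw [if_neg (by
        rw [pvInterA, hmem]
        rintro ⟨t, ht, hg⟩
        exact c1 ⟨t, ht, (pvR_one_iff _).mpr hg⟩)]
      by_cases c2 : ∃ t ∈ ts, pvR (PySem.Str.lower t) = 2
      · obtain ⟨t, ht, h2⟩ := c2
        have hM : pvMinR ts = 2 := by
          have := pvMinR_le_of_mem ht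
          have := pvLe_pvMinR (by omega) n1
          omega
        rw [if_pos ((pvInterA _ _).mpr ((hmem _).mpr ⟨t, ht, (pvR_two_iff _).mp h2⟩)), hM]
        rfl
      · have n2 : ∀ t ∈ ts, 3 ≤ pvR (PySem.Str.lower t) := by
          intro t ht
          have h := n1 t ht
          have : pvR (PySem.Str.lower t) ≠ 2 := fun h => c2 ⟨t, ht, h⟩
          omega
        have hM : pvMinR ts = 3 := by
          have := pvLe_pvMinR le_rfl n2
          have := pvMinR_le_three ts
          omega
        rw [if_neg (by
          rw [pvInterA, hmem]
          rintro ⟨t, ht, hg⟩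
          exact c2 ⟨t, ht, (pvR_two_iff _).mpr hg⟩), hM]
        rfl
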